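-- pv_equiv track=rewrite | github.com/PhungVanThai2002/python | machine.py | creat_data
-- ===== SOURCE A (Python) =====
-- def creat_data(data):
-- 	lis_number=['0','1','2','3']
-- 	Data = []
-- 	Data_socap=[]
-- 	data_output=[]
-- 	for i in range(len(data)):
-- 		for j in range(len(data[i])):
-- 			if data[i][j] in lis_number and len(Data_socap)==6:
-- 				data_output.append(int(data[i][j]))
-- 			if data[i][j] in lis_number and len(Data_socap)<6:
-- 				Data_socap.append(int(data[i][j]))
-- 		Data.append(Data_socap)
-- 		Data_socap=[]
-- 	return Data,data_output
-- ===== SOURCE B (Python) =====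
-- def creat_data(data):
--     # phase 1: one global pass collecting every matching digit into a flat
--     # buffer, remembering only how many came from each row
--     flat = []
--     counts = []
--     for row in data:
--         c = 0
--         for s in row:
--             if s in {'0', '1', '2', '3'}:
--                 flat.append(int(s))
--                 c += 1
--         counts.append(c)
--     # phase 2: carve the flat buffer back up by offsets: first min(c,6) digits
--     # of each row's segment are its sublist, the rest is overflow
--     Data = []
--     data_output = []
--     off = 0
--     for c in counts:
--         k = c if c < 6 else 6
--         Data.append(flat[off:off + k])
--         data_output += flat[off + k:off + c]
--         off += c
--     return Data, data_output
-- ===== Notes on version B (the rewrite author's own statement) =====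
-- stated objective: alternative
-- what changed: B is a two-phase algorithm: one global pass flattens all matching digits into a single buffer while recording per-row counts, then a second pass carves that buffer by running offsets (flat[off:off+min(c,6)] kept, flat[off+min(c,6):off+c] overflow), replacing A's interleaved per-character length-6 branching and per-row reset with prefix-offset slicing of a shared buffer.
import Mathlib
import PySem

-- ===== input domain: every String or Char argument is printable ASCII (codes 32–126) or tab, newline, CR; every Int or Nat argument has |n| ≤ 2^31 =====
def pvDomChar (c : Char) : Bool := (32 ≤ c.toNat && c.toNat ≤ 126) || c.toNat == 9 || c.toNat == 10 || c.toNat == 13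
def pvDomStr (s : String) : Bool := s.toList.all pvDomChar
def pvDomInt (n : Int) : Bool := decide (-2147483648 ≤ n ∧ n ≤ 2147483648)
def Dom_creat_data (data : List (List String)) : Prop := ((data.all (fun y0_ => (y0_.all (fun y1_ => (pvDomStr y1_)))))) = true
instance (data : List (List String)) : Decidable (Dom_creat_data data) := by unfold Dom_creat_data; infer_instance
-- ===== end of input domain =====

-- B is a two-phase algorithm: one global pass flattens all matching digits into one buffer
-- recording per-row counts, then a second pass carves the buffer by running offsets (objective: alternative).

-- ===== PORT A =====
-- one character step of A's inner loop: the two successive `if` statements on (Data_socap, data_output)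
def creatDataStepA (q : List Int × List Int) (s : String) : List Int × List Int :=
  let q' := if ["0", "1", "2", "3"].contains s && q.1.length == 6 then
              (q.1, q.2 ++ [(PySem.Int.ofStr? s).getD 0])
            else q
  if ["0", "1", "2", "3"].contains s && q'.1.length < 6 then
    (q'.1 ++ [(PySem.Int.ofStr? s).getD 0], q'.2)
  else q'

def creat_data (data : List (List String)) : List (List Int) × List Int :=
  data.foldl
    (fun (acc : List (List Int) × List Int) (row : List String) =>
      let q := row.foldl creatDataStepA ([], acc.2)
      (acc.1 ++ [q.1], q.2))
    ([], [])

-- ===== PORT B =====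
-- phase 1: flat buffer of all matching digits + per-row counts
def creatDataFlatCounts (data : List (List String)) : List Int × List Nat :=
  data.foldl
    (fun (acc : List Int × List Nat) (row : List String) =>
      let rc := row.foldl
        (fun (q : List Int × Nat) (s : String) =>
          if ["0", "1", "2", "3"].contains s then
            (q.1 ++ [(PySem.Int.ofStr? s).getD 0], q.2 + 1)
          else q)
        (acc.1, 0)
      (rc.1, acc.2 ++ [rc.2]))
    ([], [])

-- phase 2: carve `flat` up by offsets
def creat_data_alt (data : List (List String)) : List (List Int) × List Int :=
  let fc := creatDataFlatCounts data
  let r := fc.2.foldl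
    (fun (st : List (List Int) × List Int × Nat) (c : Nat) =>
      let off := st.2.2
      let k := if c < 6 then c else 6
      (st.1 ++ [PySem.List.slice fc.1 (some (off : Int)) (some ((off : Int) + (k : Int)))],
       st.2.1 ++ PySem.List.slice fc.1 (some ((off : Int) + (k : Int))) (some ((off : Int) + (c : Int))),
       off + c))
    ([], [], 0)
  (r.1, r.2.1)

-- ===== PRECONDITION & SPEC =====
def Spec_creat_data (data : List (List String)) (out : List (List Int) × List Int) : Prop := out = creat_data_alt data
instance (data : List (List String)) (out : List (List Int) × List Int) : Decidable (Spec_creat_data data out) := by unfold Spec_creat_data; infer_instance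

-- ===== CLAIM (what is proved, stated in full; the proofs are below) =====
def Claim_equal_creat_data : Prop := ∀ (data : List (List String)), Dom_creat_data data → Spec_creat_data data (creat_data data)

-- ===== LEMMAS AND PROOFS =====

-- the row's list of matching digits, the common reference point of both proofs
def pvNums (row : List String) : List Int :=
  (row.filter (fun s => ["0", "1", "2", "3"].contains s)).map
    (fun s => (PySem.Int.ofStr? s).getD 0)

-- A's inner loop from state (socap, out) with socap.length ≤ 6 fills socap up to 6 digits and
-- appends the overflow to out — i.e. it splits the row's digit list at position 6 - socap.length.
lemma creat_data_row (row : List String) (socap out : List Int) (h : socap.length ≤ 6) :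
    row.foldl creatDataStepA (socap, out) =
      (socap ++ (pvNums row).take (6 - socap.length),
       out ++ (pvNums row).drop (6 - socap.length)) := by
  induction row generalizing socap out with
  | nil => simp [pvNums]
  | cons s rest ih =>
    by_cases hs : s = "0" ∨ s = "1" ∨ s = "2" ∨ s = "3"
    · by_cases h6 : socap.length = 6
      · have hstep : creatDataStepA (socap, out) s =
            (socap, out ++ [(PySem.Int.ofStr? s).getD 0]) := by
          simp [creatDataStepA, hs, h6]
        simp only [List.foldl_cons, hstep, ih _ _ h, h6, pvNums, List.filter_cons]
        simp [hs]
      · have hlt : socap.length < 6 := lt_of_le_of_ne h h6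
        have hstep : creatDataStepA (socap, out) s =
            (socap ++ [(PySem.Int.ofStr? s).getD 0], out) := by
          simp [creatDataStepA, hs, h6, hlt]
        have h' : (socap ++ [(PySem.Int.ofStr? s).getD 0]).length ≤ 6 := by
          simp; omega
        simp only [List.foldl_cons, hstep, ih _ _ h', pvNums, List.filter_cons]
        have hlen : (socap ++ [(PySem.Int.ofStr? s).getD 0]).length = socap.length + 1 := by simp
        rw [hlen]
        have htake : 6 - socap.length = (6 - (socap.length + 1)) + 1 := by omega
        rw [htake]
        simp [hs, List.append_assoc]
    · have hstep : creatDataStepA (socap, out) s = (socap, out) := by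
        simp [creatDataStepA, hs]
      simp only [List.foldl_cons, hstep, ih _ _ h, pvNums, List.filter_cons]
      simp [hs]

-- A's outer loop accumulates take-6s as sublists and drop-6s into the shared output
lemma creat_data_acc (data : List (List String)) (acc : List (List Int) × List Int) :
    data.foldl
      (fun (acc : List (List Int) × List Int) (row : List String) =>
        let q := row.foldl creatDataStepA ([], acc.2)
        (acc.1 ++ [q.1], q.2))
      acc =
    (acc.1 ++ data.map (fun r => (pvNums r).take 6),
     acc.2 ++ data.flatMap (fun r => (pvNums r).drop 6)) := by
  induction data generalizing acc with
  | nil => simp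
  | cons row rest ih =>
    simp only [List.foldl_cons]
    rw [creat_data_row row [] acc.2 (by simp)]
    simp only [List.nil_append, List.length_nil, Nat.sub_zero]
    rw [ih]
    simp [List.append_assoc]

-- B phase 1, inner loop: appends the row's digits and counts them
lemma flat_row (row : List String) (fl : List Int) (c : Nat) :
    row.foldl
      (fun (q : List Int × Nat) (s : String) =>
        if ["0", "1", "2", "3"].contains s then
          (q.1 ++ [(PySem.Int.ofStr? s).getD 0], q.2 + 1)
        else q)
      (fl, c) = (fl ++ pvNums row, c + (pvNums row).length) := by
  induction row generalizing fl c with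
  | nil => simp [pvNums]
  | cons s rest ih =>
    by_cases hs : s = "0" ∨ s = "1" ∨ s = "2" ∨ s = "3"
    · have hstep :
          (if ["0", "1", "2", "3"].contains s then
            (fl ++ [(PySem.Int.ofStr? s).getD 0], c + 1)
          else (fl, c)) = (fl ++ [(PySem.Int.ofStr? s).getD 0], c + 1) := by
        simp [hs]
      simp only [List.foldl_cons, hstep, ih, pvNums, List.filter_cons]
      simp [hs, List.append_assoc]
      omega
    · have hstep :
          (if ["0", "1", "2", "3"].contains s then
            (fl ++ [(PySem.Int.ofStr? s).getD 0], c + 1)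
          else (fl, c)) = (fl, c) := by
        simp [hs]
      simp only [List.foldl_cons, hstep, ih, pvNums, List.filter_cons]
      simp [hs]

-- B phase 1, outer loop
lemma flat_counts (data : List (List String)) (fl : List Int) (cs : List Nat) :
    data.foldl
      (fun (acc : List Int × List Nat) (row : List String) =>
        let rc := row.foldl
          (fun (q : List Int × Nat) (s : String) =>
            if ["0", "1", "2", "3"].contains s then
              (q.1 ++ [(PySem.Int.ofStr? s).getD 0], q.2 + 1)
            else q)
          (acc.1, 0)
        (rc.1, acc.2 ++ [rc.2]))
      (fl, cs) =
    (fl ++ data.flatMap pvNums, cs ++ data.map (fun r => (pvNums r).length)) := by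
  induction data generalizing fl cs with
  | nil => simp
  | cons row rest ih =>
    simp only [List.foldl_cons]
    rw [flat_row]
    rw [ih]
    simp [List.append_assoc]

-- B phase 2: carving the flat buffer by offsets starting at pre.length splits each
-- row's segment at 6
lemma carve (rows : List (List String)) (flat : List Int) (pre : List Int)
    (D : List (List Int)) (O : List Int) (hflat : flat = pre ++ rows.flatMap pvNums) :
    (rows.map (fun r => (pvNums r).length)).foldl
      (fun (st : List (List Int) × List Int × Nat) (c : Nat) =>
        let off := st.2.2
        let k := if c < 6 then c else 6
        (st.1 ++ [PySem.List.slice flat (some (off : Int)) (some ((off : Int) + (k : Int)))],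
         st.2.1 ++ PySem.List.slice flat (some ((off : Int) + (k : Int))) (some ((off : Int) + (c : Int))),
         off + c))
      (D, O, pre.length) =
    (D ++ rows.map (fun r => (pvNums r).take 6),
     O ++ rows.flatMap (fun r => (pvNums r).drop 6),
     pre.length + (rows.flatMap pvNums).length) := by
  induction rows generalizing pre D O with
  | nil => simp [hflat]
  | cons r rs ih =>
    set c := (pvNums r).length with hc
    set k := if c < 6 then c else 6 with hk
    have hkc : k ≤ c := by rw [hk]; split <;> omega
    have hrest : flat = (pre ++ pvNums r) ++ rs.flatMap pvNums := by
      simp [hflat, List.append_assoc]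
    -- first slice: the kept prefix of the row's segment
    have hdrop : flat.drop pre.length = pvNums r ++ rs.flatMap pvNums := by
      rw [hflat, List.drop_left, List.flatMap_cons]
    have hslice1 : PySem.List.slice flat (some (pre.length : Int))
        (some ((pre.length : Int) + (k : Int))) = (pvNums r).take 6 := by
      rw [PySem.List.slice_natCast_add, hdrop,
        List.take_append_of_le_length (by omega)]
      rw [hk]; split
      · rw [List.take_of_length_le (by omega), List.take_of_length_le (by omega)]
      · rfl
    -- second slice: the overflow of the row's segment
    have hslice2 : PySem.List.slice flat (some ((pre.length : Int) + (k : Int)))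
        (some ((pre.length : Int) + (c : Int))) = (pvNums r).drop 6 := by
      have hcast : ((pre.length : Int) + (c : Int)) =
          (((pre.length + k : Nat) : Int) + ((c - k : Nat) : Int)) := by push_cast; omega
      have hcast2 : ((pre.length : Int) + (k : Int)) = (((pre.length + k : Nat) : Int)) := by
        push_cast; ring
      rw [hcast, hcast2, PySem.List.slice_natCast_add]
      rw [← List.drop_drop, hdrop, List.drop_append_of_le_length (by omega)]
      rw [List.take_append_of_le_length (by simp; omega)]
      rw [List.take_of_length_le (by simp; omega)]
      rw [hk]; split
      · rw [List.drop_of_length_le (by omega), List.drop_of_length_le (by omega)]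
      · rfl
    simp only [List.map_cons, List.foldl_cons, ← hc, ← hk, hslice1, hslice2]
    have hlen : pre.length + c = (pre ++ pvNums r).length := by simp [hc]
    rw [hlen, ih (pre ++ pvNums r) _ _ hrest]
    simp [List.append_assoc]
    omega

-- ===== VERDICT (by name: the statement is the Claim_ definition above) =====
theorem creat_data_spec : Claim_equal_creat_data := by
  intro data _
  show creat_data data = creat_data_alt data
  have ha : creat_data data =
      (data.map (fun r => (pvNums r).take 6), data.flatMap (fun r => (pvNums r).drop 6)) := by
    unfold creat_data
    rw [creat_data_acc]
    simp
  have hfc : creatDataFlatCounts data =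
      (data.flatMap pvNums, data.map (fun r => (pvNums r).length)) := by
    unfold creatDataFlatCounts
    rw [flat_counts]
    simp
  have hcarve := carve data (data.flatMap pvNums) [] [] [] (by simp)
  simp only [List.length_nil] at hcarve
  have hb : creat_data_alt data =
      (data.map (fun r => (pvNums r).take 6), data.flatMap (fun r => (pvNums r).drop 6)) := by
    simp only [creat_data_alt, hfc]
    rw [hcarve]
    simp
  rw [ha, hb]
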